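-- pv_equiv track=rewrite | github.com/bronemos/artificial-intelligence | lab3py/solution.py | __filter_by_v
-- ===== SOURCE A (Python) =====
-- from copy import deepcopy
--
-- def __filter_by_v(d: dict, y: str, v: str) -> dict:
--     return_d = deepcopy(d)
--     to_remove = set()
--     for key in return_d.keys():
--         [
--             to_remove.add(index)
--             for index in range(len(return_d[key]))
--             if return_d[y][index] != v
--         ]
--     for key in return_d.keys():
--         return_d[key] = [
--             el for index, el in enumerate(return_d[key]) if index not in to_remove
--         ]
--     return return_d
-- ===== SOURCE B (Python) =====
-- from copy import deepcopy
--
-- def __filter_by_v(d: dict, y: str, v: str) -> dict: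
--     keep = [i for i, val in enumerate(d.get(y, [])) if val == v]
--     return {
--         key: [deepcopy(col[i]) for i in keep if i < len(col)]
--         for key, col in d.items()
--     }
-- ===== Notes on version B (the rewrite author's own statement) =====
-- stated objective: simpler
-- what changed: B computes the kept row indices in one pass over the y-column and projects each column onto them by direct indexing, instead of A's per-key recomputation of a removal set followed by a membership-filter rebuild of every column.
import Mathlib
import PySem

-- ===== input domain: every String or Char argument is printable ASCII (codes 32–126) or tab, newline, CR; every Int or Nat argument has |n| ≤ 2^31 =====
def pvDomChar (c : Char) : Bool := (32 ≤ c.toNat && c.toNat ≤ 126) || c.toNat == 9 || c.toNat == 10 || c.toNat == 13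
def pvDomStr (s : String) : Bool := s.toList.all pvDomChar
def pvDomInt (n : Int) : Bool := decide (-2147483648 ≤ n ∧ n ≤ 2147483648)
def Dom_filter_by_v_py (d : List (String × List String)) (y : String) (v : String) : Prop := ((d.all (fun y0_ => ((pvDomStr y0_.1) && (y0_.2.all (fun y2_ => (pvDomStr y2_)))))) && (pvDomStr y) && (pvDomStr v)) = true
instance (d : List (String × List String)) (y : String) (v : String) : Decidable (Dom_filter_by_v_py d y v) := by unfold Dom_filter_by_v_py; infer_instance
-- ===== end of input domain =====

-- B replaces A's per-key recomputation of a removal set with one pass over the key column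
-- collecting the kept row indices, then projects every column onto those indices (simpler;
-- return-value equivalence only: A deep-copies, but all values here are immutable strings).

-- ===== PORT A =====
def filter_by_v_py (d : List (String × List String)) (y : String) (v : String) : List (String × List String) :=
  let ycol := (List.lookup y d).getD []
  let toRemove : PySem.Set Int :=
    d.foldl (fun s kv =>
      (PySem.List.pyRange 0 (kv.2.length : Int) 1).foldl
        (fun s i => if PySem.List.pyGetD ycol i "" ≠ v then PySem.Set.add s i else s) s)
      PySem.Set.empty
  d.map (fun kv =>
    (kv.1, ((PySem.List.enumerate kv.2).filter
        (fun p => !(PySem.Set.contains toRemove p.1))).map (·.2)))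

-- ===== PORT B =====
def filter_by_v_py_alt (d : List (String × List String)) (y : String) (v : String) : List (String × List String) :=
  let ycol := (List.lookup y d).getD []
  let keep : List Int :=
    ((PySem.List.enumerate ycol).filter (fun p => p.2 == v)).map (·.1)
  d.map (fun kv =>
    (kv.1, (keep.filter (fun i => i < (kv.2.length : Int))).map
        (fun i => PySem.List.pyGetD kv.2 i "")))

-- ===== PRECONDITION & SPEC =====
-- Pre_ is exactly where the Python A returns: every column at most as long as the y-column
-- (a longer column makes A index return_d[y] out of range → IndexError; a missing y with a
-- nonempty column → KeyError; with all columns empty A never indexes and returns d unchanged).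
def Pre_filter_by_v_py (d : List (String × List String)) (y : String) (v : String) : Prop :=
  ∀ kv ∈ d, kv.2.length ≤ ((List.lookup y d).getD []).length
instance (d : List (String × List String)) (y : String) (v : String) : Decidable (Pre_filter_by_v_py d y v) := by unfold Pre_filter_by_v_py; infer_instance

def pvWitness_filter_by_v_py : (List (String × List String)) × String × String :=
  ([("a", ["x", "y"]), ("b", ["u", "w"])], "a", "x")

def Spec_filter_by_v_py (d : List (String × List String)) (y : String) (v : String) (out : List (String × List String)) : Prop := out = filter_by_v_py_alt d y v
instance (d : List (String × List String)) (y : String) (v : String) (out : List (String × List String)) : Decidable (Spec_filter_by_v_py d y v out) := by unfold Spec_filter_by_v_py; infer_instance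

-- ===== CLAIM (what is proved, stated in full; the proofs are below) =====
def Claim_equal_filter_by_v_py : Prop := ∀ (d : List (String × List String)) (y : String) (v : String), Dom_filter_by_v_py d y v → Pre_filter_by_v_py d y v → Spec_filter_by_v_py d y v (filter_by_v_py d y v)

-- ===== LEMMAS AND PROOFS =====

-- membership in the inner conditional-add fold
lemma mem_fold_add_if (p : Int → Prop) [DecidablePred p] (l : List Int) (s : PySem.Set Int) (x : Int) :
    x ∈ l.foldl (fun s i => if p i then PySem.Set.add s i else s) s ↔ x ∈ s ∨ (x ∈ l ∧ p x) := by
  induction l generalizing s with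
  | nil => simp
  | cons a t ih =>
    simp only [List.foldl_cons, ih]
    by_cases hpa : p a
    · simp [hpa, PySem.Set.mem_add]
      constructor
      · rintro ((h | rfl) | h)
        · exact Or.inl h
        · exact Or.inr ⟨Or.inl rfl, hpa⟩
        · exact Or.inr ⟨Or.inr h.1, h.2⟩
      · rintro (h | ⟨(rfl | hm), hp⟩)
        · exact Or.inl (Or.inl h)
        · exact Or.inl (Or.inr rfl)
        · exact Or.inr ⟨hm, hp⟩
    · simp [hpa]
      constructor
      · rintro (h | h)
        · exact Or.inl h
        · exact Or.inr ⟨Or.inr h.1, h.2⟩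
      · rintro (h | ⟨(rfl | hm), hp⟩)
        · exact Or.inl h
        · exact (hpa hp).elim
        · exact Or.inr ⟨hm, hp⟩

-- membership in A's toRemove fold over the dict
lemma mem_toRemove (p : Int → Prop) [DecidablePred p] (d0 : List (String × List String))
    (s : PySem.Set Int) (x : Int) :
    x ∈ d0.foldl (fun s kv =>
        (PySem.List.pyRange 0 (kv.2.length : Int) 1).foldl
          (fun s i => if p i then PySem.Set.add s i else s) s) s ↔
      x ∈ s ∨ ∃ kv ∈ d0, x ∈ PySem.List.pyRange 0 (kv.2.length : Int) 1 ∧ p x := by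
  induction d0 generalizing s with
  | nil => simp
  | cons a t ih =>
    simp only [List.foldl_cons, ih, mem_fold_add_if]
    constructor
    · rintro (((h | h) | h))
      · exact Or.inl h
      · exact Or.inr ⟨a, List.mem_cons_self, h.1, h.2⟩
      · obtain ⟨kv, hm, h1, h2⟩ := h
        exact Or.inr ⟨kv, List.mem_cons_of_mem a hm, h1, h2⟩
    · rintro (h | ⟨kv, hm, h1, h2⟩)
      · exact Or.inl (Or.inl h)
      · rcases List.mem_cons.mp hm with rfl | hm
        · exact Or.inl (Or.inr ⟨h1, h2⟩)
        · exact Or.inr ⟨kv, hm, h1, h2⟩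


-- per-column equality: A's enumerate/membership filter equals B's kept-index projection
lemma col_eq (ycol col : List String) (v : String) (tr : PySem.Set Int)
    (hlen : col.length ≤ ycol.length)
    (htr : ∀ j : Int, 0 ≤ j → j < (col.length : Int) →
      (j ∈ tr ↔ PySem.List.pyGetD ycol j "" ≠ v)) :
    ((PySem.List.enumerate col).filter (fun p => !(PySem.Set.contains tr p.1))).map (·.2)
      = ((((PySem.List.enumerate ycol).filter (fun p => p.2 == v)).map (·.1)).filter
          (fun i => i < (col.length : Int))).map (fun i => PySem.List.pyGetD col i "") := by
  rw [PySem.List.enumerate_eq_map_pyRange col "", PySem.List.enumerate_eq_map_pyRange ycol ""]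
  simp only [List.filter_map, List.map_map, List.filter_filter, Function.comp_def]
  congr 1
  have hsplit : PySem.List.pyRange 0 (PySem.List.len ycol) =
      PySem.List.pyRange 0 (PySem.List.len col) ++
      PySem.List.pyRange (PySem.List.len col) (PySem.List.len ycol) := by
    apply PySem.List.pyRange_one_append
    · simp [PySem.List.len]
    · simp [PySem.List.len]; exact_mod_cast hlen
  rw [hsplit, List.filter_append]
  have h2 : (PySem.List.pyRange (PySem.List.len col) (PySem.List.len ycol)).filter
      (fun a => decide (a < (col.length : Int)) && (PySem.List.pyGetD ycol a "" == v)) = [] := by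
    apply List.filter_eq_nil_iff.mpr
    intro a ha
    have := PySem.List.mem_pyRange_one.mp ha
    simp only [PySem.List.len] at this
    simp [show ¬ (a < (col.length : Int)) by omega]
  rw [h2, List.append_nil]
  apply List.filter_congr
  intro j hj
  have hjr := PySem.List.mem_pyRange_one.mp hj
  simp only [PySem.List.len] at hjr
  have hmem := htr j hjr.1 hjr.2
  by_cases h : PySem.List.pyGetD ycol j "" = v
  · have hnt : j ∉ tr := fun hx => (hmem.mp hx) h
    simp [h, hjr.2, hnt]
  · have ht : j ∈ tr := hmem.mpr h
    simp [h, ht]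

-- ===== VERDICT (by name: the statement is the Claim_ definition above) =====
theorem filter_by_v_py_spec : Claim_equal_filter_by_v_py := by
  intro d y v _ hpre
  unfold Spec_filter_by_v_py
  simp only [filter_by_v_py, filter_by_v_py_alt]
  apply List.map_congr_left
  intro kv hkv
  have hlen := hpre kv hkv
  refine Prod.ext rfl ?_
  apply col_eq
  · exact hlen
  · intro j hj0 hjlt
    rw [mem_toRemove (fun i => PySem.List.pyGetD ((List.lookup y d).getD []) i "" ≠ v) d
      PySem.Set.empty j]
    constructor
    · rintro (h | ⟨kv', _, _, h2⟩)
      · simp [PySem.Set.empty] at h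
      · exact h2
    · intro h
      exact Or.inr ⟨kv, hkv, PySem.List.mem_pyRange_one.mpr ⟨hj0, by simpa using hjlt⟩, h⟩
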